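-- pv_equiv track=rewrite | github.com/bwcs99/bachelor-dissertation | algorithms/flow_finder.py | get_residual_capacity
-- ===== SOURCE A (Python) =====
-- def get_residual_capacity(path, neighbours_list):
--     """
--     Funkcja służąca do znalezienia przepustowości i krawędzi residualnej dla
--     aktualnej ścieżki ze źródła do ujścia.
--     """
--
--     capacities = []
--     edges = []
--
--     for edge in path:
--         u = edge[0]
--         v = edge[1]
--
--         for neighbour in neighbours_list[u]:
--             if neighbour[0] == v:
--                 capacities.append(neighbour[1])
--                 edges.append((u, v))
--
--     residual_capacity = min(capacities)
--     residual_capacity_index = capacities.index(residual_capacity)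
--
--     u, v = edges[residual_capacity_index][0], edges[residual_capacity_index][1]
--
--     return residual_capacity, u, v
-- ===== SOURCE B (Python) =====
-- def get_residual_capacity(path, neighbours_list):
--     """Single pass: track the first minimum-capacity matching edge directly
--     instead of building capacities/edges lists and re-scanning them."""
--     best_cap = None
--     best_edge = None
--
--     for u, v in path:
--         for neighbour in neighbours_list[u]:
--             if neighbour[0] == v and (best_cap is None or neighbour[1] < best_cap):
--                 best_cap = neighbour[1]
--                 best_edge = (u, v)
--
--     if best_cap is None:
--         raise ValueError("no matching edge on path")
--
--     return best_cap, best_edge[0], best_edge[1]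
-- ===== Notes on version B (the rewrite author's own statement) =====
-- stated objective: simpler
-- what changed: Instead of accumulating two parallel lists (capacities, edges) and then re-scanning them with min(), .index() and an indexed lookup, B keeps a single running first-minimum (best_cap, best_edge) updated during the same traversal and returns it directly.
import Mathlib
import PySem

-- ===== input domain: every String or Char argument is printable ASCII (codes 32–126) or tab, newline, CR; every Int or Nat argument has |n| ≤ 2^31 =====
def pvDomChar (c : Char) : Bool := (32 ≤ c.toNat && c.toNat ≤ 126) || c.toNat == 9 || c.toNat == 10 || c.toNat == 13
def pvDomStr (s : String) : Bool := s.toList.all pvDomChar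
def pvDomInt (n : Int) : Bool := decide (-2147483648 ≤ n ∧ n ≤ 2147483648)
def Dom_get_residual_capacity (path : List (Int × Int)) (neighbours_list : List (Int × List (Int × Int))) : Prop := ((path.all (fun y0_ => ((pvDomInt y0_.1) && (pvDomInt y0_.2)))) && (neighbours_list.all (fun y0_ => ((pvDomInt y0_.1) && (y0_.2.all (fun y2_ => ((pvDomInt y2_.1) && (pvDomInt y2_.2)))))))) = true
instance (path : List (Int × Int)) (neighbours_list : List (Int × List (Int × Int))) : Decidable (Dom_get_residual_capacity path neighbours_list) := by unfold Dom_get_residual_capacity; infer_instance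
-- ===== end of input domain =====

-- B replaces A's two accumulated parallel lists plus a min/index/re-index epilogue by one
-- running first-minimum kept during the same traversal (objective: simpler).

-- ===== PORT A =====
-- inner 'for neighbour in neighbours_list[u]' loop: append matching capacity and edge
def grcInnerA (u v : Int) (ns : List (Int × Int)) (acc : List Int × List (Int × Int)) :
    List Int × List (Int × Int) :=
  ns.foldl (fun acc n => if n.1 == v then (acc.1 ++ [n.2], acc.2 ++ [(u, v)]) else acc) acc

-- outer 'for edge in path' loop; none = KeyError from neighbours_list[u]
def grcCollect (neighbours_list : List (Int × List (Int × Int))) (path : List (Int × Int)) :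
    Option (List Int × List (Int × Int)) :=
  path.foldl (fun st edge =>
    match st with
    | none => none
    | some acc =>
      match (PySem.Dict.ofList neighbours_list).get? edge.1 with
      | none => none
      | some ns => some (grcInnerA edge.1 edge.2 ns acc)) (some ([], []))

def get_residual_capacity (path : List (Int × Int)) (neighbours_list : List (Int × List (Int × Int))) : Int × Int × Int :=
  match grcCollect neighbours_list path with
  | none => (0, 0, 0)                -- KeyError; excluded by Pre_
  | some (capacities, edges) =>
    match PySem.List.min? capacities (fun x => x) with
    | none => (0, 0, 0)              -- ValueError from min([]); excluded by Pre_
    | some residual_capacity =>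
      match PySem.List.index? capacities residual_capacity with
      | none => (0, 0, 0)            -- unreachable: the minimum is a member
      | some residual_capacity_index =>
        match PySem.List.pyGet? edges ((residual_capacity_index : Nat) : Int) with
        | none => (0, 0, 0)          -- unreachable: the two lists run in parallel
        | some e => (residual_capacity, e.1, e.2)

-- ===== PORT B =====
-- one update of the running best for one neighbour
def grcStep (u v : Int) (best : Option (Int × Int × Int)) (n : Int × Int) : Option (Int × Int × Int) :=
  if n.1 == v then
    match best with
    | none => some (n.2, u, v)
    | some b => if n.2 < b.1 then some (n.2, u, v) else some b
  else best

-- outer 'for u, v in path' loop of B; outer none = KeyError from neighbours_list[u]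
def grcBest (neighbours_list : List (Int × List (Int × Int))) (path : List (Int × Int)) :
    Option (Option (Int × Int × Int)) :=
  path.foldl (fun st edge =>
    match st with
    | none => none
    | some best =>
      match (PySem.Dict.ofList neighbours_list).get? edge.1 with
      | none => none
      | some ns => some (ns.foldl (grcStep edge.1 edge.2) best)) (some none)

def get_residual_capacity_alt (path : List (Int × Int)) (neighbours_list : List (Int × List (Int × Int))) : Int × Int × Int :=
  match grcBest neighbours_list path with
  | some (some r) => r
  | _ => (0, 0, 0)                   -- KeyError / ValueError; excluded by Pre_

-- ===== PRECONDITION & SPEC =====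
-- Pre_ excludes exactly the inputs on which the Python A raises: a path vertex u that is not a
-- key of neighbours_list (KeyError), and paths with no matching neighbour at all (min([]) ValueError).
def Pre_get_residual_capacity (path : List (Int × Int)) (neighbours_list : List (Int × List (Int × Int))) : Prop :=
  (∀ e ∈ path, ((PySem.Dict.ofList neighbours_list).get? e.1).isSome = true) ∧
  (∃ e ∈ path, ∃ n ∈ ((PySem.Dict.ofList neighbours_list).get? e.1).getD [], n.1 = e.2)

instance (path : List (Int × Int)) (neighbours_list : List (Int × List (Int × Int))) : Decidable (Pre_get_residual_capacity path neighbours_list) := by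
  unfold Pre_get_residual_capacity; infer_instance

def pvWitness_get_residual_capacity : (List (Int × Int)) × (List (Int × List (Int × Int))) :=
  ([(0, 1)], [(0, [(1, 5)])])

def Spec_get_residual_capacity (path : List (Int × Int)) (neighbours_list : List (Int × List (Int × Int))) (out : Int × Int × Int) : Prop := out = get_residual_capacity_alt path neighbours_list
instance (path : List (Int × Int)) (neighbours_list : List (Int × List (Int × Int))) (out : Int × Int × Int) : Decidable (Spec_get_residual_capacity path neighbours_list out) := by unfold Spec_get_residual_capacity; infer_instance

-- ===== CLAIM (what is proved, stated in full; the proofs are below) =====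
def Claim_equal_get_residual_capacity : Prop := ∀ (path : List (Int × Int)) (neighbours_list : List (Int × List (Int × Int))), Dom_get_residual_capacity path neighbours_list → Pre_get_residual_capacity path neighbours_list → Spec_get_residual_capacity path neighbours_list (get_residual_capacity path neighbours_list)

-- ===== LEMMAS AND PROOFS =====

-- A's epilogue (min, first index, parallel lookup), packaged as one function of the two lists.
def grcFinish (caps : List Int) (edges : List (Int × Int)) : Option (Int × Int × Int) :=
  match PySem.List.min? caps (fun x => x) with
  | none => none
  | some m =>
    match PySem.List.index? caps m with
    | none => none
    | some i =>
      match edges[i]? with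
      | none => none
      | some e => some (m, e.1, e.2)

-- appending one hit to the parallel lists updates the epilogue exactly like B's running best
theorem grcFinish_append (c u v : Int) (caps : List Int) (edges : List (Int × Int))
    (h : caps.length = edges.length) :
    grcFinish (caps ++ [c]) (edges ++ [(u, v)]) =
      (match grcFinish caps edges with
       | none => some (c, u, v)
       | some b => if c < b.1 then some (c, u, v) else some b) := by
  match caps, edges with
  | [], [] =>
    simp [grcFinish, PySem.List.min?, PySem.List.index?]
  | a :: t, e0 :: es =>
    have hm : PySem.List.min? (a :: t) (fun y => y) = some (t.foldl min a) :=
      PySem.List.min?_id_cons a t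
    set M := t.foldl min a with hM
    have hMmem : M ∈ a :: t := PySem.List.min?_mem hm
    have hMmin : ∀ y ∈ a :: t, M ≤ y := fun y hy => PySem.List.min?_isMin hm y hy
    have hm' : PySem.List.min? ((a :: t) ++ [c]) (fun y => y) = some (min M c) := by
      rw [show ((a :: t) ++ [c]) = a :: (t ++ [c]) by rfl, PySem.List.min?_id_cons a (t ++ [c])]
      simp [List.foldl_append, hM]
    by_cases hc : c < M
    · have hmin : min M c = c := min_eq_right hc.le
      have hcnot : c ∉ a :: t := fun hmem => absurd (hMmin c hmem) (by omega)
      have hidx : PySem.List.index? ((a :: t) ++ [c]) c = some (a :: t).length :=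
        PySem.List.index?_append_singleton_self (a :: t) c hcnot
      obtain ⟨i, hi⟩ : ∃ i, PySem.List.index? (a :: t) M = some i :=
        Option.isSome_iff_exists.mp ((PySem.List.index?_isSome_iff _ _).mpr hMmem)
      obtain ⟨hik, hgi, -⟩ := PySem.List.getElem_of_index?_eq_some hi
      have hie : i < (e0 :: es).length := h ▸ hik
      have hcat : ((e0 :: es) ++ [(u, v)])[(a :: t).length]? = some (u, v) := by
        rw [h]; exact List.getElem?_concat_length
      unfold grcFinish
      simp only [hm', hmin, hidx, hm, hi, hcat, List.getElem?_eq_getElem hie]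
      simp [hc]
    · have hmin : min M c = M := min_eq_left (by omega)
      have hidx : PySem.List.index? ((a :: t) ++ [c]) M = PySem.List.index? (a :: t) M :=
        PySem.List.index?_append_of_mem _ hMmem
      obtain ⟨i, hi⟩ : ∃ i, PySem.List.index? (a :: t) M = some i :=
        Option.isSome_iff_exists.mp ((PySem.List.index?_isSome_iff _ _).mpr hMmem)
      obtain ⟨hik, hgi, -⟩ := PySem.List.getElem_of_index?_eq_some hi
      have hie : i < (e0 :: es).length := h ▸ hik
      have hgl : ((e0 :: es) ++ [(u, v)])[i]? = (e0 :: es)[i]? :=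
        List.getElem?_append_left hie
      unfold grcFinish
      simp only [hm', hmin, hidx, hm, hi, hgl, List.getElem?_eq_getElem hie]
      simp [hc]

-- the inner loops keep the lists parallel and the running best equal to the epilogue of the lists
theorem grcInner_inv (u v : Int) (ns : List (Int × Int)) (caps : List Int)
    (edges : List (Int × Int)) (best : Option (Int × Int × Int))
    (hlen : caps.length = edges.length) (hb : best = grcFinish caps edges) :
    (grcInnerA u v ns (caps, edges)).1.length = (grcInnerA u v ns (caps, edges)).2.length ∧
    ns.foldl (grcStep u v) best = grcFinish (grcInnerA u v ns (caps, edges)).1 (grcInnerA u v ns (caps, edges)).2 := by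
  induction ns generalizing caps edges best with
  | nil => exact ⟨by simpa [grcInnerA] using hlen, by simpa [grcInnerA] using hb⟩
  | cons n ns ih =>
    by_cases hv : n.1 = v
    · have h1 : grcInnerA u v (n :: ns) (caps, edges)
          = grcInnerA u v ns (caps ++ [n.2], edges ++ [(u, v)]) := by
        simp [grcInnerA, hv]
      have h2 : (n :: ns).foldl (grcStep u v) best
          = ns.foldl (grcStep u v) (grcStep u v best n) := rfl
      rw [h1, h2]
      apply ih
      · simp [hlen]
      · rw [grcFinish_append n.2 u v caps edges hlen, ← hb]
        cases best <;> simp [grcStep, hv]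
    · have h1 : grcInnerA u v (n :: ns) (caps, edges) = grcInnerA u v ns (caps, edges) := by
        simp [grcInnerA, hv]
      have h2 : (n :: ns).foldl (grcStep u v) best = ns.foldl (grcStep u v) best := by
        simp [List.foldl, grcStep, hv]
      rw [h1, h2]
      exact ih caps edges best hlen hb

theorem grcCollect_none (nl : List (Int × List (Int × Int))) (path : List (Int × Int)) :
    path.foldl (fun st edge =>
      match st with
      | none => none
      | some acc =>
        match (PySem.Dict.ofList nl).get? edge.1 with
        | none => none
        | some ns => some (grcInnerA edge.1 edge.2 ns acc))
      (none : Option (List Int × List (Int × Int))) = none := by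
  induction path with
  | nil => rfl
  | cons e p ih => simpa [List.foldl] using ih

theorem grcBest_none (nl : List (Int × List (Int × Int))) (path : List (Int × Int)) :
    path.foldl (fun st edge =>
      match st with
      | none => none
      | some best =>
        match (PySem.Dict.ofList nl).get? edge.1 with
        | none => none
        | some ns => some (ns.foldl (grcStep edge.1 edge.2) best))
      (none : Option (Option (Int × Int × Int))) = none := by
  induction path with
  | nil => rfl
  | cons e p ih => simpa [List.foldl] using ih

-- the outer loops: either both sides hit a missing key, or the states stay related
theorem grcOuter_inv (nl : List (Int × List (Int × Int))) (path : List (Int × Int))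
    (caps : List Int) (edges : List (Int × Int)) (best : Option (Int × Int × Int))
    (hlen : caps.length = edges.length) (hb : best = grcFinish caps edges) :
    (path.foldl (fun st edge =>
        match st with
        | none => none
        | some acc =>
          match (PySem.Dict.ofList nl).get? edge.1 with
          | none => none
          | some ns => some (grcInnerA edge.1 edge.2 ns acc)) (some (caps, edges)) = none ∧
     path.foldl (fun st edge =>
        match st with
        | none => none
        | some b =>
          match (PySem.Dict.ofList nl).get? edge.1 with
          | none => none
          | some ns => some (ns.foldl (grcStep edge.1 edge.2) b)) (some best) = none) ∨
    (∃ caps' edges', caps'.length = edges'.length ∧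
      path.foldl (fun st edge =>
        match st with
        | none => none
        | some acc =>
          match (PySem.Dict.ofList nl).get? edge.1 with
          | none => none
          | some ns => some (grcInnerA edge.1 edge.2 ns acc)) (some (caps, edges)) = some (caps', edges') ∧
      path.foldl (fun st edge =>
        match st with
        | none => none
        | some b =>
          match (PySem.Dict.ofList nl).get? edge.1 with
          | none => none
          | some ns => some (ns.foldl (grcStep edge.1 edge.2) b)) (some best) = some (grcFinish caps' edges')) := by
  induction path generalizing caps edges best with
  | nil =>
    right
    exact ⟨caps, edges, hlen, rfl, by subst hb; rfl⟩
  | cons e p ih =>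
    simp only [List.foldl]
    cases hg : (PySem.Dict.ofList nl).get? e.1 with
    | none =>
      left
      exact ⟨grcCollect_none nl p, grcBest_none nl p⟩
    | some ns =>
      obtain ⟨hlen', hfold⟩ := grcInner_inv e.1 e.2 ns caps edges best hlen hb
      exact ih (grcInnerA e.1 e.2 ns (caps, edges)).1 (grcInnerA e.1 e.2 ns (caps, edges)).2
        (ns.foldl (grcStep e.1 e.2) best) hlen' hfold

-- ===== VERDICT (by name: the statement is the Claim_ definition above) =====
theorem get_residual_capacity_spec : Claim_equal_get_residual_capacity := by
  intro path nl _ _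
  unfold Spec_get_residual_capacity get_residual_capacity get_residual_capacity_alt grcCollect grcBest
  rcases grcOuter_inv nl path [] [] none rfl (by rfl) with ⟨hA, hB⟩ | ⟨caps', edges', hlen, hA, hB⟩
  · rw [hA, hB]
  · rw [hA, hB]
    dsimp only
    unfold grcFinish
    cases hmin : PySem.List.min? caps' (fun x => x) with
    | none => rfl
    | some m =>
      dsimp only
      cases hidx : PySem.List.index? caps' m with
      | none => rfl
      | some i =>
        dsimp only
        simp only [PySem.List.pyGet?_natCast]
        cases hg : edges'[i]? with
        | none => rfl
        | some e => rfl
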